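-- pv_equiv track=rewrite | github.com/andrewbaine/td-gammon | src/bt_2.py | all_moves_die_start
-- ===== SOURCE A (Python) =====
-- zero_t = (0, 1, 0)
--
-- start_t = (1, 16, -1)
--
-- move_dest = (0, 16, 1)
--
-- hit_dest = (-1, 0, 2)
--
-- bar_t = (-14, 1, -1)
--
-- empty_t = (-15, 1, 0)
--
-- any_t = (-15, 16, 0)
--
-- def r():
--     return range(26)
--
-- def split_out(m):
--     ps = []
--     qs = []
--     rs = []
--     for a, b, c in m:
--         ps.append(a)
--         qs.append(b)
--         rs.append(c)
--     assert len(ps) == 26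
--     assert len(qs) == 26
--     assert len(rs) == 26
--     return ps, qs, rs
--
-- def all_moves_die_start(die, start):
--     assert 0 < die < 7
--     assert 0 < start < 26
--     end = start - die
--     move = (start, end)
--     if end < 0:
--         # over-bearoff
--         low, high, vector = split_out(
--             [empty_t if i > start else start_t if i == start else any_t for i in r()]
--         )
--         return [([start, end, 0], low, high, vector)]
--     elif end == 0:
--         # exact bearoff
--         low, high, vector = split_out(
--             [empty_t if i > 6 else start_t if i == start else any_t for i in r()]
--         )
--         return [([start, end, 0], low, high, vector)]
--     else:
--         assert end > 0
--         if start == 25: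
--             move = [
--                 start_t if i == start else move_dest if i == end else any_t for i in r()
--             ]
--             hit = [
--                 (
--                     start_t
--                     if i == start
--                     else hit_dest if i == end else bar_t if i == 0 else any_t
--                 )
--                 for i in r()
--             ]
--             a, b, c = split_out(move)
--             d, e, f = split_out(hit)
--             return [
--                 ([start, end, 0], a, b, c),
--                 ([start, end, 1], d, e, f),
--             ]
--         assert start != 25
--         move = [
--             (
--                 zero_t
--                 if i == 25
--                 else (start_t if i == start else move_dest if i == end else any_t)
--             )
--             for i in r()
--         ]
--         hit = [
--             (
--                 zero_t
--                 if i == 25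
--                 else (
--                     start_t
--                     if i == start
--                     else hit_dest if i == end else bar_t if i == 0 else any_t
--                 )
--             )
--             for i in r()
--         ]
--         a, b, c = split_out(move)
--         s, t, u = split_out(hit)
--         return [([start, end, 0], a, b, c), ([start, end, 1], s, t, u)]
-- ===== SOURCE B (Python) =====
-- zero_t = (0, 1, 0)
-- start_t = (1, 16, -1)
-- move_dest = (0, 16, 1)
-- hit_dest = (-1, 0, 2)
-- bar_t = (-14, 1, -1)
-- empty_t = (-15, 1, 0)
-- any_t = (-15, 16, 0)
--
-- def _render(patch, cut, i=0):
--     # Recursively build the three column lists directly from a sparse patch dict: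
--     # no 26-slot tuple table is ever materialized and nothing is transposed.
--     if i == 26:
--         return [], [], []
--     low, high, vec = _render(patch, cut, i + 1)
--     a, b, c = patch.get(i, empty_t if cut is not None and i > cut else any_t)
--     return [a] + low, [b] + high, [c] + vec
--
-- def all_moves_die_start(die, start):
--     assert 0 < die < 7
--     assert 0 < start < 26
--     end = start - die
--     if end < 0:
--         return [([start, end, 0], *_render({start: start_t}, start))]
--     if end == 0:
--         return [([start, end, 0], *_render({start: start_t}, 6))]
--     base = {} if start == 25 else {25: zero_t}
--     mv = _render({**base, start: start_t, end: move_dest}, None)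
--     ht = _render({**base, 0: bar_t, start: start_t, end: hit_dest}, None)
--     return [([start, end, 0], *mv), ([start, end, 1], *ht)]
-- ===== Notes on version B (the rewrite author's own statement) =====
-- stated objective: alternative
-- what changed: B represents each board as a sparse dict of special cells plus a default rule and builds the three column lists directly by recursion over the indices (consing back-to-front), so no 26-slot tuple table is materialized and A's split_out transpose loop disappears.
import Mathlib
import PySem

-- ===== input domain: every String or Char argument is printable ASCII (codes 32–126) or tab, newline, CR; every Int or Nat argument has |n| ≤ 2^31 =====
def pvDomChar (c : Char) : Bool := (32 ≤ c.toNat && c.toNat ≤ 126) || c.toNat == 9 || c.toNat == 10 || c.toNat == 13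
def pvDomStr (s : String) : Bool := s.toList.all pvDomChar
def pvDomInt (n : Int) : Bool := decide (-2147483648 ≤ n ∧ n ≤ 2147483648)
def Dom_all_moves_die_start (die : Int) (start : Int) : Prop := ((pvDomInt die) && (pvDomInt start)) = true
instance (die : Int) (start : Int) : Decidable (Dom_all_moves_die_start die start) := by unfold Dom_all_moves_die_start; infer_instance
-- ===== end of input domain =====

-- B builds each board from a sparse dict of special cells plus a default rule, consing the
-- three column lists directly by recursion over the indices — no 26-slot table, no transpose
-- (objective: alternative; same cost, fixed-size boards).

-- ===== PORT A =====
def pyZero_t : Int × Int × Int := (0, 1, 0)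
def pyStart_t : Int × Int × Int := (1, 16, -1)
def pyMove_dest : Int × Int × Int := (0, 16, 1)
def pyHit_dest : Int × Int × Int := (-1, 0, 2)
def pyBar_t : Int × Int × Int := (-14, 1, -1)
def pyEmpty_t : Int × Int × Int := (-15, 1, 0)
def pyAny_t : Int × Int × Int := (-15, 16, 0)

def pyR : List Int := PySem.List.pyRange 0 26 1

-- literal port of split_out: appends to three accumulators in one pass
def split_out (m : List (Int × Int × Int)) : List Int × List Int × List Int :=
  m.foldl (fun (acc : List Int × List Int × List Int) t =>
      (acc.1 ++ [t.1], acc.2.1 ++ [t.2.1], acc.2.2 ++ [t.2.2])) ([], [], [])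

def all_moves_die_start (die : Int) (start : Int) : List (List Int × List Int × List Int × List Int) :=
  let e := start - die
  if e < 0 then
    -- over-bearoff
    let (low, high, vector) :=
      split_out (pyR.map (fun i => if i > start then pyEmpty_t else if i = start then pyStart_t else pyAny_t))
    [([start, e, 0], low, high, vector)]
  else if e = 0 then
    -- exact bearoff
    let (low, high, vector) :=
      split_out (pyR.map (fun i => if i > 6 then pyEmpty_t else if i = start then pyStart_t else pyAny_t))
    [([start, e, 0], low, high, vector)]
  else if start = 25 then
    let move := pyR.map (fun i => if i = start then pyStart_t else if i = e then pyMove_dest else pyAny_t)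
    let hit := pyR.map (fun i => if i = start then pyStart_t else if i = e then pyHit_dest else if i = 0 then pyBar_t else pyAny_t)
    let (a, b, c) := split_out move
    let (d, e', f) := split_out hit
    [([start, e, 0], a, b, c), ([start, e, 1], d, e', f)]
  else
    let move := pyR.map (fun i => if i = 25 then pyZero_t else if i = start then pyStart_t else if i = e then pyMove_dest else pyAny_t)
    let hit := pyR.map (fun i => if i = 25 then pyZero_t else if i = start then pyStart_t else if i = e then pyHit_dest else if i = 0 then pyBar_t else pyAny_t)
    let (a, b, c) := split_out move
    let (s, t, u) := split_out hit
    [([start, e, 0], a, b, c), ([start, e, 1], s, t, u)]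

-- ===== PORT B =====
-- patch.get(i, default) with the case-dependent default rule
def bCell (patch : PySem.Dict Int (Int × Int × Int)) (cut : Option Int) (i : Int) : Int × Int × Int :=
  (patch.get? i).getD
    (match cut with
     | some c => if i > c then pyEmpty_t else pyAny_t
     | none => pyAny_t)

-- _render's recursion i -> i+1, bottoming out at i = 26, transcribed as structural
-- recursion on the remaining count k = 26 - i (exact for the call _render(patch, cut, 0) = bRender patch cut 26)
def bRender (patch : PySem.Dict Int (Int × Int × Int)) (cut : Option Int) : Nat → List Int × List Int × List Int
  | 0 => ([], [], [])
  | k + 1 =>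
    let (low, high, vec) := bRender patch cut k
    let t := bCell patch cut (25 - (k : Int))
    (t.1 :: low, t.2.1 :: high, t.2.2 :: vec)

def all_moves_die_start_alt (die : Int) (start : Int) : List (List Int × List Int × List Int × List Int) :=
  let e := start - die
  if e < 0 then
    let (low, high, vector) := bRender (PySem.Dict.empty.insert start pyStart_t) (some start) 26
    [([start, e, 0], low, high, vector)]
  else if e = 0 then
    let (low, high, vector) := bRender (PySem.Dict.empty.insert start pyStart_t) (some 6) 26
    [([start, e, 0], low, high, vector)]
  else
    let base := if start = 25 then PySem.Dict.empty else PySem.Dict.empty.insert 25 pyZero_t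
    let (a, b, c) := bRender ((base.insert start pyStart_t).insert e pyMove_dest) none 26
    let (d, e', f) := bRender (((base.insert 0 pyBar_t).insert start pyStart_t).insert e pyHit_dest) none 26
    [([start, e, 0], a, b, c), ([start, e, 1], d, e', f)]

-- ===== PRECONDITION & SPEC =====
-- Pre_ excludes exactly the inputs on which A's asserts raise AssertionError.
def Pre_all_moves_die_start (die : Int) (start : Int) : Prop :=
  (0 < die ∧ die < 7) ∧ (0 < start ∧ start < 26)
instance (die : Int) (start : Int) : Decidable (Pre_all_moves_die_start die start) := by
  unfold Pre_all_moves_die_start; infer_instance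

def pvWitness_all_moves_die_start : Int × Int := (3, 10)

def Spec_all_moves_die_start (die : Int) (start : Int) (out : List (List Int × List Int × List Int × List Int)) : Prop := out = all_moves_die_start_alt die start
instance (die : Int) (start : Int) (out : List (List Int × List Int × List Int × List Int)) : Decidable (Spec_all_moves_die_start die start out) := by unfold Spec_all_moves_die_start; infer_instance

-- ===== CLAIM (what is proved, stated in full; the proofs are below) =====
def Claim_equal_all_moves_die_start : Prop := ∀ (die : Int) (start : Int), Dom_all_moves_die_start die start → Pre_all_moves_die_start die start → Spec_all_moves_die_start die start (all_moves_die_start die start)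

-- ===== LEMMAS AND PROOFS =====
theorem pv_foldl_split (m : List (Int × Int × Int)) (p q r : List Int) :
    m.foldl (fun (acc : List Int × List Int × List Int) t =>
        (acc.1 ++ [t.1], acc.2.1 ++ [t.2.1], acc.2.2 ++ [t.2.2])) (p, q, r)
      = (p ++ m.map (fun t => t.1), q ++ m.map (fun t => t.2.1), r ++ m.map (fun t => t.2.2)) := by
  induction m generalizing p q r with
  | nil => simp
  | cons h t ih => simp [ih]

theorem pv_split_out_eq (m : List (Int × Int × Int)) :
    split_out m = (m.map (fun t => t.1), m.map (fun t => t.2.1), m.map (fun t => t.2.2)) := by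
  simpa [split_out] using pv_foldl_split m [] [] []

-- characterization of bRender: it produces the three columns of the cell map over the last k indices
theorem pv_bRender_eq (patch : PySem.Dict Int (Int × Int × Int)) (cut : Option Int)
    (k : Nat) (hk : k ≤ 26) :
    bRender patch cut k
      = (((List.range' (26 - k) k).map (fun n : Nat => (bCell patch cut (n : Int)).1)),
         ((List.range' (26 - k) k).map (fun n : Nat => (bCell patch cut (n : Int)).2.1)),
         ((List.range' (26 - k) k).map (fun n : Nat => (bCell patch cut (n : Int)).2.2))) := by
  induction k with
  | zero => simp [bRender]
  | succ k ih =>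
    have h1 : 26 - (k + 1) + 1 = 26 - k := by omega
    have h2 : ((26 - (k + 1) : Nat) : Int) = 25 - (k : Int) := by push_cast; omega
    rw [bRender, ih (by omega), List.range'_succ, h1]
    simp only [List.map_cons, h2]

theorem pv_map_pyR {α : Type} (f : Int → α) :
    pyR.map f = (List.range 26).map (fun n : Nat => f (n : Int)) := by
  simp [pyR, PySem.List.pyRange_one, List.map_map]

-- A's list = columns of g pointwise ⇒ split_out of A's list = bRender's columns
theorem pv_cols (f : Int → Int × Int × Int) (patch : PySem.Dict Int (Int × Int × Int))
    (cut : Option Int) (h : ∀ n : Nat, n < 26 → f (n : Int) = bCell patch cut (n : Int)) :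
    split_out (pyR.map f) = bRender patch cut 26 := by
  rw [pv_split_out_eq, pv_bRender_eq patch cut 26 (by omega), pv_map_pyR]
  have hr : (List.range' (26 - 26) 26) = List.range 26 := by
    simp [List.range_eq_range']
  rw [hr]
  simp only [List.map_map, Prod.mk.injEq]
  refine ⟨?_, ?_, ?_⟩ <;>
    (apply List.map_congr_left; intro n hn; simp only [Function.comp];
     rw [h n (List.mem_range.mp hn)])

theorem pv_c1 (die start : Int) (hs26 : start < 26) (n : Nat) (hn : n < 26) :
    (if (n : Int) > start then pyEmpty_t else if (n : Int) = start then pyStart_t else pyAny_t)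
      = bCell (PySem.Dict.empty.insert start pyStart_t) (some start) (n : Int) := by
  simp only [bCell, PySem.Dict.get?_insert, PySem.Dict.get?_empty]
  split_ifs <;> first | rfl | omega

theorem pv_c2 (die start : Int) (hd7 : die < 7) (hs0 : 0 < start) (he : start - die = 0)
    (n : Nat) (hn : n < 26) :
    (if (n : Int) > 6 then pyEmpty_t else if (n : Int) = start then pyStart_t else pyAny_t)
      = bCell (PySem.Dict.empty.insert start pyStart_t) (some 6) (n : Int) := by
  simp only [bCell, PySem.Dict.get?_insert, PySem.Dict.get?_empty]
  split_ifs <;> first | rfl | omega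

theorem pv_c3m (die start : Int) (hd0 : 0 < die) (n : Nat) (hn : n < 26) :
    (if (n : Int) = start then pyStart_t else if (n : Int) = start - die then pyMove_dest else pyAny_t)
      = bCell ((PySem.Dict.empty.insert start pyStart_t).insert (start - die) pyMove_dest) none (n : Int) := by
  simp only [bCell, PySem.Dict.get?_insert, PySem.Dict.get?_empty]
  split_ifs <;> first | rfl | omega

theorem pv_c3h (die start : Int) (hd0 : 0 < die) (hs0 : 0 < start) (he : 0 < start - die)
    (n : Nat) (hn : n < 26) :
    (if (n : Int) = start then pyStart_t else if (n : Int) = start - die then pyHit_dest else if (n : Int) = 0 then pyBar_t else pyAny_t)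
      = bCell (((PySem.Dict.empty.insert 0 pyBar_t).insert start pyStart_t).insert (start - die) pyHit_dest) none (n : Int) := by
  simp only [bCell, PySem.Dict.get?_insert, PySem.Dict.get?_empty]
  split_ifs <;> first | rfl | omega

theorem pv_c4m (die start : Int) (hd0 : 0 < die) (hs26 : start < 26) (he : 0 < start - die)
    (hs25 : start ≠ 25) (n : Nat) (hn : n < 26) :
    (if (n : Int) = 25 then pyZero_t else if (n : Int) = start then pyStart_t else if (n : Int) = start - die then pyMove_dest else pyAny_t)
      = bCell (((PySem.Dict.empty.insert 25 pyZero_t).insert start pyStart_t).insert (start - die) pyMove_dest) none (n : Int) := by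
  simp only [bCell, PySem.Dict.get?_insert, PySem.Dict.get?_empty]
  split_ifs <;> first | rfl | omega

theorem pv_c4h (die start : Int) (hd0 : 0 < die) (hs0 : 0 < start) (hs26 : start < 26)
    (he : 0 < start - die) (hs25 : start ≠ 25) (n : Nat) (hn : n < 26) :
    (if (n : Int) = 25 then pyZero_t else if (n : Int) = start then pyStart_t else if (n : Int) = start - die then pyHit_dest else if (n : Int) = 0 then pyBar_t else pyAny_t)
      = bCell ((((PySem.Dict.empty.insert 25 pyZero_t).insert 0 pyBar_t).insert start pyStart_t).insert (start - die) pyHit_dest) none (n : Int) := by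
  simp only [bCell, PySem.Dict.get?_insert, PySem.Dict.get?_empty]
  split_ifs <;> first | rfl | omega

-- ===== VERDICT (by name: the statement is the Claim_ definition above) =====
theorem all_moves_die_start_spec : Claim_equal_all_moves_die_start := by
  intro die start _ hpre
  obtain ⟨⟨hd0, hd7⟩, hs0, hs26⟩ := hpre
  unfold Spec_all_moves_die_start
  simp only [all_moves_die_start, all_moves_die_start_alt]
  by_cases he0 : start - die < 0
  · rw [if_pos he0, if_pos he0, pv_cols _ _ _ (pv_c1 die start hs26)]
  · by_cases he1 : start - die = 0
    · rw [if_neg he0, if_pos he1, if_neg he0, if_pos he1,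
        pv_cols _ _ _ (pv_c2 die start hd7 hs0 he1)]
    · have he2 : 0 < start - die := by omega
      rw [if_neg he0, if_neg he1, if_neg he0, if_neg he1]
      by_cases hs25 : start = 25
      · rw [if_pos hs25, if_pos hs25,
          pv_cols _ _ _ (pv_c3m die start hd0),
          pv_cols _ _ _ (pv_c3h die start hd0 hs0 he2)]
      · rw [if_neg hs25, if_neg hs25,
          pv_cols _ _ _ (pv_c4m die start hd0 hs26 he2 hs25),
          pv_cols _ _ _ (pv_c4h die start hd0 hs0 hs26 he2 hs25)]
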